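-- pv_equiv track=rewrite | github.com/fudanhuxiao/algorithms | check-if-an-original-string-exists-given-two-encoded-strings.py | parse
-- ===== SOURCE A (Python) =====
-- def parse(s):
--     t, i, n = [], 0, len(s)
--     while i < n:
--         if not s[i].isdigit():
--             t.append(s[i])
--             i += 1
--         else:
--             j = i+1
--             while j < n and s[j].isdigit():
--                 j += 1
--             t.append(s[i:j])
--             i = j
--     return t
-- ===== SOURCE B (Python) =====
-- def parse(s):
--     n = len(s)
--     cuts = [i for i, c in enumerate(s) if i == 0 or not (c.isdigit() and s[i - 1].isdigit())]
--     return [s[a:b] for a, b in zip(cuts, cuts[1:] + [n])]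
-- ===== Notes on version B (the rewrite author's own statement) =====
-- stated objective: alternative
-- what changed: Replaced A's single-pass two-level index walk (inner loop scanning each digit run) by two staged passes: first compute the list of token-start positions (index 0 or any position not inside a digit pair), then slice the string between consecutive cut points.
import Mathlib
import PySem

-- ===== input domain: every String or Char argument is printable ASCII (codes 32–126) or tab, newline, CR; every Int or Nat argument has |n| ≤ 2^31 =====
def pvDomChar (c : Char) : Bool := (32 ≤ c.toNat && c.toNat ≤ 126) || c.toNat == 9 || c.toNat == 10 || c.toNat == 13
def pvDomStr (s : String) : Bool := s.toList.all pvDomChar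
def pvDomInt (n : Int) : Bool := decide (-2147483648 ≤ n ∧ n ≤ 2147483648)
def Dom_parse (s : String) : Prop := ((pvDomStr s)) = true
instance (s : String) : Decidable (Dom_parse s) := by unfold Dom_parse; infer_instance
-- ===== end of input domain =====

-- B replaces A's single-pass two-level index walk by two staged passes (collect token-start
-- positions, then slice between consecutive cuts); alternative decomposition, return value only.

-- ===== PORT A =====
-- inner 'while j < n and s[j].isdigit(): j += 1' together with the slice s[i:j]:
-- returns (the scanned digit characters, the remaining characters)
def parseScan (l : List Char) : List Char × List Char :=
  match l with
  | [] => ([], [])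
  | c :: rest =>
    if PySem.Chars.isdigit c then
      let p := parseScan rest
      (c :: p.1, p.2)
    else ([], c :: rest)

-- length bound used by parseGo's termination proof
theorem parseScan_len (l : List Char) : (parseScan l).2.length ≤ l.length := by
  induction l with
  | nil => simp [parseScan]
  | cons d ds ih =>
    simp only [parseScan]
    split
    · exact le_trans ih (by simp)
    · simp

-- outer 'while i < n' loop of A, over the remaining characters
def parseGo (l : List Char) : List String :=
  match l with
  | [] => []
  | c :: rest =>
    if ¬ PySem.Chars.isdigit c then
      String.mk [c] :: parseGo rest
    else
      let p := parseScan rest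
      String.mk (c :: p.1) :: parseGo p.2
termination_by l.length
decreasing_by
  · simp
  · have := parseScan_len rest; simp; omega

def parse (s : String) : List String := parseGo s.toList

-- ===== PORT B =====
-- '[i for i, c in enumerate(s) if i == 0 or not (c.isdigit() and s[i-1].isdigit())]'
-- (inside the comprehension every index accessed is in range, so getD is exact)
def parseIsCut (l : List Char) (i : Nat) : Bool :=
  i == 0 || !(PySem.Chars.isdigit (l.getD i ' ') && PySem.Chars.isdigit (l.getD (i - 1) ' '))

def parseCuts (l : List Char) : List Nat :=
  (List.range l.length).filter (parseIsCut l)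

-- '[s[a:b] for a, b in zip(cuts, cuts[1:] + [n])]' (0 ≤ a ≤ b ≤ n, so the slice is drop/take)
def parseAltL (l : List Char) : List String :=
  ((parseCuts l).zip ((parseCuts l).drop 1 ++ [l.length])).map
    (fun ab => String.mk ((l.drop ab.1).take (ab.2 - ab.1)))

def parse_alt (s : String) : List String := parseAltL s.toList

-- ===== PRECONDITION & SPEC =====
def Spec_parse (s : String) (out : List String) : Prop := out = parse_alt s
instance (s : String) (out : List String) : Decidable (Spec_parse s out) := by unfold Spec_parse; infer_instance

-- ===== CLAIM (what is proved, stated in full; the proofs are below) =====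
def Claim_equal_parse : Prop := ∀ (s : String), Dom_parse s → Spec_parse s (parse s)

-- ===== LEMMAS AND PROOFS =====

-- A's inner scan is takeWhile/dropWhile of isdigit
theorem parseScan_eq (l : List Char) :
    parseScan l = (l.takeWhile PySem.Chars.isdigit, l.dropWhile PySem.Chars.isdigit) := by
  induction l with
  | nil => simp [parseScan]
  | cons c rest ih =>
    simp only [parseScan, List.takeWhile, List.dropWhile]
    by_cases h : PySem.Chars.isdigit c <;> simp [h, ih]


-- the cut positions of t ++ r, when t is one whole token, are 0 followed by r's cuts shifted by t.length
theorem parseCuts_token (t r : List Char) (ht : t ≠ [])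
    (hinner : ∀ i, 1 ≤ i → i < t.length →
      PySem.Chars.isdigit (t.getD i ' ') ∧ PySem.Chars.isdigit (t.getD (i - 1) ' '))
    (hbound : ∀ d, r.head? = some d →
      ¬(PySem.Chars.isdigit d ∧ PySem.Chars.isdigit (t.getLast ht))) :
    parseCuts (t ++ r) = 0 :: (parseCuts r).map (· + t.length) := by
  have hk : 1 ≤ t.length := List.length_pos_iff.mpr ht
  unfold parseCuts
  rw [List.length_append, List.range_add, List.filter_append]
  have h1 : (List.range t.length).filter (parseIsCut (t ++ r)) = [0] := by
    have he : t.length = 1 + (t.length - 1) := by omega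
    rw [he, List.range_add, List.filter_append]
    have h0 : (List.range 1).filter (parseIsCut (t ++ r)) = [0] := by
      simp [List.range_succ, parseIsCut]
    have hnil : (List.filter (parseIsCut (t ++ r)) ((List.range (t.length - 1)).map (fun x => 1 + x))) = [] := by
      rw [List.filter_eq_nil_iff]
      intro a ha
      rcases List.mem_map.mp ha with ⟨i, hi, rfl⟩
      have hi' : i < t.length - 1 := List.mem_range.mp hi
      have hlt : 1 + i < t.length := by omega
      have hd := hinner (1 + i) (by omega) hlt
      have e1 : (t ++ r).getD (1 + i) ' ' = t.getD (1 + i) ' ' :=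
        List.getD_append t r ' ' (1 + i) hlt
      have e2 : (t ++ r).getD (1 + i - 1) ' ' = t.getD (1 + i - 1) ' ' :=
        List.getD_append t r ' ' (1 + i - 1) (by omega)
      simp only [parseIsCut, e1, e2, hd.1, hd.2]
      simp
    rw [h0, hnil]
    simp
  have h2 : ∀ i ∈ List.range r.length,
      parseIsCut (t ++ r) (t.length + i) = parseIsCut r i := by
    intro i hi
    have him : i < r.length := List.mem_range.mp hi
    have e1 : (t ++ r).getD (t.length + i) ' ' = r.getD i ' ' := by
      rw [List.getD_append_right t r ' ' _ (by omega)]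
      congr 1
      omega
    by_cases h0 : i = 0
    · subst h0
      have hr : r ≠ [] := by
        intro h
        rw [h] at him
        simp at him
      have hhd : r.head? = some (r.getD 0 ' ') := by
        cases r with
        | nil => exact absurd rfl hr
        | cons a as => simp [List.getD]
      have hb := hbound _ hhd
      have e2 : (t ++ r).getD (t.length + 0 - 1) ' ' = t.getLast ht := by
        rw [List.getD_append t r ' ' _ (by omega)]
        rw [List.getLast_eq_getElem]
        rw [List.getD_eq_getElem t ' ' (show t.length + 0 - 1 < t.length by omega)]
        simp
      simp only [parseIsCut, e1, e2]
      rcases Bool.eq_false_or_eq_true (PySem.Chars.isdigit (r.getD 0 ' ')) with h | h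
      · have hl : PySem.Chars.isdigit (t.getLast ht) = false := by
          rcases Bool.eq_false_or_eq_true (PySem.Chars.isdigit (t.getLast ht)) with h' | h'
          · exact absurd ⟨h, h'⟩ hb
          · exact h'
        rw [h, hl]
        simp
      · rw [h]
        simp
    · have e2 : (t ++ r).getD (t.length + i - 1) ' ' = r.getD (i - 1) ' ' := by
        rw [List.getD_append_right t r ' ' _ (by omega)]
        congr 1
        omega
      have hz1 : (t.length + i == 0) = false := by simp; omega
      have hz2 : (i == 0) = false := by simp [h0]
      simp only [parseIsCut, e1, e2, hz1, hz2]
  have h3 : (List.filter (parseIsCut (t ++ r)) ((List.range r.length).map (fun x => t.length + x)))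
      = ((List.range r.length).filter (parseIsCut r)).map (· + t.length) :=
    calc (List.filter (parseIsCut (t ++ r)) ((List.range r.length).map (fun x => t.length + x)))
      = ((List.range r.length).filter ((parseIsCut (t ++ r)) ∘ (fun x => t.length + x))).map
          (fun x => t.length + x) := List.filter_map
    _ = ((List.range r.length).filter (parseIsCut r)).map (fun x => t.length + x) := by
        rw [List.filter_congr]
        intro i hi
        simpa using h2 i hi
    _ = ((List.range r.length).filter (parseIsCut r)).map (· + t.length) := by
        apply List.map_congr_left
        intro i _
        omega
  rw [h1, h3]
  simp

-- the first cut of a nonempty list is 0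
theorem parseCuts_nonempty (r : List Char) (hr : r ≠ []) :
    ∃ S', parseCuts r = 0 :: S' := by
  have hm : 1 ≤ r.length := List.length_pos_iff.mpr hr
  refine ⟨(List.filter (parseIsCut r) ((List.range (r.length - 1)).map Nat.succ)), ?_⟩
  unfold parseCuts
  have he : r.length = (r.length - 1) + 1 := by omega
  rw [he, List.range_succ_eq_map, List.filter_cons]
  have h0 : parseIsCut r 0 = true := by simp [parseIsCut]
  rw [h0]
  simp

-- shifting every cut by k shifts every zipped pair by k
theorem parse_zip_shift (S : List Nat) (k m : Nat) :
    List.zip (S.map (· + k)) ((S.map (· + k)).drop 1 ++ [k + m])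
      = (List.zip S (S.drop 1 ++ [m])).map (Prod.map (· + k) (· + k)) := by
  have h1 : (S.map (· + k)).drop 1 ++ [k + m] = ((S.drop 1) ++ [m]).map (· + k) := by
    rw [List.map_append, List.map_drop]
    simp [Nat.add_comm]
  rw [h1, List.zip_map]

-- slicing t ++ r at its cuts yields the token t followed by the slices of r
theorem parseAltL_token (t r : List Char) (ht : t ≠ [])
    (hinner : ∀ i, 1 ≤ i → i < t.length →
      PySem.Chars.isdigit (t.getD i ' ') ∧ PySem.Chars.isdigit (t.getD (i - 1) ' '))
    (hbound : ∀ d, r.head? = some d →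
      ¬(PySem.Chars.isdigit d ∧ PySem.Chars.isdigit (t.getLast ht))) :
    parseAltL (t ++ r) = String.mk t :: parseAltL r := by
  have hcuts := parseCuts_token t r ht hinner hbound
  by_cases hr : r = []
  · subst hr
    have hnil : parseCuts ([] : List Char) = [] := by simp [parseCuts]
    unfold parseAltL
    rw [hcuts, hnil]
    simp
  · rcases parseCuts_nonempty r hr with ⟨S', hS⟩
    have hstep : List.zip (0 :: (parseCuts r).map (· + t.length))
          ((0 :: (parseCuts r).map (· + t.length)).drop 1 ++ [t.length + r.length])
        = (0, t.length) ::
          (List.zip (parseCuts r) ((parseCuts r).drop 1 ++ [r.length])).map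
            (Prod.map (· + t.length) (· + t.length)) := by
      rw [← parse_zip_shift (parseCuts r) t.length r.length, hS]
      simp [List.zip_cons_cons]
    unfold parseAltL
    rw [hcuts, List.length_append, hstep, List.map_cons, List.map_map]
    congr 1
    · simp
    · apply List.map_congr_left
      intro ab _
      obtain ⟨a, b⟩ := ab
      simp only [Function.comp, Prod.map]
      have hd : (t ++ r).drop (a + t.length) = r.drop a := by
        rw [List.drop_append]
        have h1 : t.drop (a + t.length) = [] := List.drop_eq_nil_iff.mpr (by omega)
        have h2 : a + t.length - t.length = a := by omega
        rw [h1, h2]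
        simp
      rw [hd]
      have : b + t.length - (a + t.length) = b - a := by omega
      rw [this]

theorem parseGo_eq_altL (l : List Char) : parseGo l = parseAltL l := by
  induction hn : l.length using Nat.strong_induction_on generalizing l with
  | _ n ih =>
    rcases l with _ | ⟨c, rest⟩
    · simp [parseGo, parseAltL, parseCuts]
    · by_cases hc : PySem.Chars.isdigit c = true
      · -- digit token: t = c followed by the digit run of rest
        have hsplit : c :: rest
            = (c :: rest.takeWhile PySem.Chars.isdigit) ++ rest.dropWhile PySem.Chars.isdigit := by
          simp [List.takeWhile_append_dropWhile]
        have ht : (c :: rest.takeWhile PySem.Chars.isdigit) ≠ [] := by simp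
        have halldig : ∀ x ∈ c :: rest.takeWhile PySem.Chars.isdigit,
            PySem.Chars.isdigit x = true := by
          intro x hx
          rcases List.mem_cons.mp hx with rfl | hx
          · exact hc
          · exact List.mem_takeWhile_imp hx
        have hinner : ∀ i, 1 ≤ i → i < (c :: rest.takeWhile PySem.Chars.isdigit).length →
            PySem.Chars.isdigit ((c :: rest.takeWhile PySem.Chars.isdigit).getD i ' ')
              ∧ PySem.Chars.isdigit ((c :: rest.takeWhile PySem.Chars.isdigit).getD (i - 1) ' ') := by
          intro i h1 h2
          constructor
          · rw [List.getD_eq_getElem _ ' ' h2]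
            exact halldig _ (List.getElem_mem _)
          · rw [List.getD_eq_getElem _ ' ' (show i - 1 < _ by omega)]
            exact halldig _ (List.getElem_mem _)
        have hbound : ∀ d, (rest.dropWhile PySem.Chars.isdigit).head? = some d →
            ¬(PySem.Chars.isdigit d
              ∧ PySem.Chars.isdigit ((c :: rest.takeWhile PySem.Chars.isdigit).getLast ht)) := by
          intro d hd hcon
          have hne : rest.dropWhile PySem.Chars.isdigit ≠ [] := by
            intro h
            rw [h] at hd
            simp at hd
          have hh : (rest.dropWhile PySem.Chars.isdigit).head hne = d := by
            rw [List.head?_eq_head hne] at hd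
            exact Option.some.inj hd
          have hf := List.head_dropWhile_not PySem.Chars.isdigit hne
          rw [hh] at hf
          rw [hcon.1] at hf
          exact Bool.true_eq_false.mp hf
        have hlen : (rest.dropWhile PySem.Chars.isdigit).length < n := by
          have := List.length_dropWhile_le (p := PySem.Chars.isdigit) (l := rest)
          simp at hn
          omega
        calc parseGo (c :: rest)
            = String.mk (c :: rest.takeWhile PySem.Chars.isdigit)
                :: parseGo (rest.dropWhile PySem.Chars.isdigit) := by
              rw [parseGo]
              simp only [hc, not_true_eq_false, if_false, parseScan_eq]
          _ = String.mk (c :: rest.takeWhile PySem.Chars.isdigit)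
                :: parseAltL (rest.dropWhile PySem.Chars.isdigit) := by
              rw [ih _ hlen _ rfl]
          _ = parseAltL ((c :: rest.takeWhile PySem.Chars.isdigit)
                ++ rest.dropWhile PySem.Chars.isdigit) :=
              (parseAltL_token _ _ ht hinner hbound).symm
          _ = parseAltL (c :: rest) := by rw [← hsplit]
      · -- single non-digit character token [c]
        have hc' : PySem.Chars.isdigit c = false := by
          rcases Bool.eq_false_or_eq_true (PySem.Chars.isdigit c) with h | h
          · exact absurd h hc
          · exact h
        have ht : ([c] : List Char) ≠ [] := by simp
        have hinner : ∀ i, 1 ≤ i → i < ([c] : List Char).length →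
            PySem.Chars.isdigit (([c] : List Char).getD i ' ')
              ∧ PySem.Chars.isdigit (([c] : List Char).getD (i - 1) ' ') := by
          intro i h1 h2
          simp at h2
          omega
        have hbound : ∀ d, rest.head? = some d →
            ¬(PySem.Chars.isdigit d ∧ PySem.Chars.isdigit (([c] : List Char).getLast ht)) := by
          intro d _ hcon
          have : ([c] : List Char).getLast ht = c := rfl
          rw [this, hc'] at hcon
          exact Bool.false_eq_true.mp hcon.2
        have hlen : rest.length < n := by
          simp at hn
          omega
        calc parseGo (c :: rest)
            = String.mk [c] :: parseGo rest := by
              rw [parseGo]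
              simp only [hc', Bool.false_eq_true, not_false_iff, if_true]
          _ = String.mk [c] :: parseAltL rest := by rw [ih _ hlen _ rfl]
          _ = parseAltL ([c] ++ rest) := (parseAltL_token _ _ ht hinner hbound).symm
          _ = parseAltL (c :: rest) := rfl

-- ===== VERDICT (by name: the statement is the Claim_ definition above) =====
theorem parse_spec : Claim_equal_parse := by
  intro s _
  unfold Spec_parse parse parse_alt
  exact parseGo_eq_altL s.toList
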